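-- pv_equiv track=rewrite | github.com/ks-kimy/algorithm | 0131/1979_2.py | count_M
-- ===== SOURCE A (Python) =====
-- def count_M(matrix,M):
--     cnt = 0
--     for lst in matrix:
--         for i in lst:
--             if i == M:
--                 cnt += 1
--             elif i == M+1:
--                 cnt -= 1
--     return cnt
-- ===== SOURCE B (Python) =====
-- def count_M(matrix, M):
--     if not matrix:
--         return 0
--     head, tail = matrix[0], matrix[1:]
--     return head.count(M) - head.count(M + 1) + count_M(tail, M)
-- ===== Notes on version B (the rewrite author's own statement) =====
-- stated objective: alternative
-- what changed: B is recursive on the matrix and computes each row's contribution by two staged list.count passes (head.count(M) - head.count(M+1)) instead of A's iterative nested loops branching per element into a running signed counter.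
import Mathlib
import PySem

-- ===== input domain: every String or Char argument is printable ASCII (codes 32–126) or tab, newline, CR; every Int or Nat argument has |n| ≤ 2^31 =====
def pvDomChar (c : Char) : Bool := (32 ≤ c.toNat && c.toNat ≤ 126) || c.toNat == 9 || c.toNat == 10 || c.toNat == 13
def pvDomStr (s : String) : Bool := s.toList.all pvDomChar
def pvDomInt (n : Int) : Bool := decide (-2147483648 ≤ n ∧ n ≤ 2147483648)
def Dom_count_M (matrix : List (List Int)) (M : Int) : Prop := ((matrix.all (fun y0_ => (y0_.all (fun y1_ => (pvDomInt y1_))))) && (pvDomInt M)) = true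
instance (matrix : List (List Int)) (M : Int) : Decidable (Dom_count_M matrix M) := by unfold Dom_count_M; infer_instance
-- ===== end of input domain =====

-- B replaces A's nested loops with a running signed counter by structural recursion on the rows, each row's contribution computed by two list.count passes.

-- ===== PORT A =====
-- nested for-loops with a running signed counter, branches in A's order
def count_M (matrix : List (List Int)) (M : Int) : Int :=
  matrix.foldl (fun cnt lst =>
    lst.foldl (fun cnt i =>
      if i == M then cnt + 1
      else if i == M + 1 then cnt - 1
      else cnt) cnt) 0

-- ===== PORT B =====
-- if not matrix: return 0; else head.count(M) - head.count(M+1) + count_M(tail, M)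
def count_M_alt : List (List Int) → Int → Int
  | [], _ => 0
  | head :: tail, M =>
      (PySem.List.count head M : Int) - (PySem.List.count head (M + 1) : Int) + count_M_alt tail M

-- ===== PRECONDITION & SPEC =====
def Spec_count_M (matrix : List (List Int)) (M : Int) (out : Int) : Prop := out = count_M_alt matrix M
instance (matrix : List (List Int)) (M : Int) (out : Int) : Decidable (Spec_count_M matrix M out) := by unfold Spec_count_M; infer_instance

-- ===== CLAIM (what is proved, stated in full; the proofs are below) =====
def Claim_equal_count_M : Prop := ∀ (matrix : List (List Int)) (M : Int), Dom_count_M matrix M → Spec_count_M matrix M (count_M matrix M)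

-- ===== LEMMAS AND PROOFS =====

-- ===== VERDICT (by name: the statement is the Claim_ definition above) =====
theorem pv_A_row (xs : List Int) (M c : Int) :
    xs.foldl (fun cnt i =>
      if i == M then cnt + 1
      else if i == M + 1 then cnt - 1
      else cnt) c
    = c + (xs.count M : Int) - (xs.count (M + 1) : Int) := by
  induction xs generalizing c with
  | nil => simp
  | cons x xs ih =>
    simp only [List.foldl_cons, List.count_cons, ih]
    by_cases h1 : x = M
    · have h2 : ¬ x = M + 1 := by omega
      simp [h1]; ring
    · by_cases h2 : x = M + 1
      · simp [h2]; ring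
      · simp [h1, h2]

theorem count_M_spec : Claim_equal_count_M := by
  unfold Claim_equal_count_M
  intro matrix M hdom
  clear hdom
  unfold Spec_count_M
  suffices h : ∀ c : Int,
      matrix.foldl (fun cnt lst =>
        lst.foldl (fun cnt i =>
          if i == M then cnt + 1
          else if i == M + 1 then cnt - 1
          else cnt) cnt) c
      = c + count_M_alt matrix M by
    simpa [count_M] using h 0
  induction matrix with
  | nil => simp [count_M_alt]
  | cons row rows ih =>
    intro c
    simp only [List.foldl_cons, count_M_alt, PySem.List.count_eq]
    rw [pv_A_row, ih]
    ring
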